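-- pv_equiv track=rewrite | github.com/Aasthaengg/IBMdataset | Python_codes/p03014/s041652102.py | connection_check
-- ===== SOURCE A (Python) =====
-- def connection_check(target_list):
--     connection = 0
--     connection_list = list()
--
--     for i in range(len(target_list)):
--         if target_list[i]=="#":
--             connection_list += [connection for _ in range(connection)]
--             connection_list += [0]
--             connection = 0
--         elif target_list[i]==".":
--             connection += 1
--
--     return connection_list
-- ===== SOURCE B (Python) =====
-- def connection_check(target_list):
--     # Phase 1: split the list on "#" into closed segments (trailing tail discarded).
--     segments = []
--     current = []
--     for x in target_list:
--         if x == "#":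
--             segments.append(current)
--             current = []
--         else:
--             current.append(x)
--     # Phase 2: each closed segment with L dots contributes [L]*L + [0].
--     out = []
--     for seg in segments:
--         L = seg.count(".")
--         out += [L] * L
--         out.append(0)
--     return out
-- ===== Notes on version B (the rewrite author's own statement) =====
-- stated objective: alternative
-- what changed: Replaces A's single pass with a running dot-counter and in-loop flushing by a two-phase decomposition: first split the list on '#' into closed segments (discarding the trailing tail), then emit [L]*L + [0] per segment where L is that segment's dot count.
import Mathlib
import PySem

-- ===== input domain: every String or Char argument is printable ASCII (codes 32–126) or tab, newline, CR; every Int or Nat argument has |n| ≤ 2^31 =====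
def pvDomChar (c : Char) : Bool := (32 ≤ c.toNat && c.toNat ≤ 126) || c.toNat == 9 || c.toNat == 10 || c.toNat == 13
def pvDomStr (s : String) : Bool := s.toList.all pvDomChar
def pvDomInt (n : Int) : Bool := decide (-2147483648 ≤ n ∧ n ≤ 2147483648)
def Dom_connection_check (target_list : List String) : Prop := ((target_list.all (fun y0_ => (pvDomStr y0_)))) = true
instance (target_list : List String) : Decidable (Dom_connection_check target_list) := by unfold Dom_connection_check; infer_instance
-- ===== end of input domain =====

-- B rewrites A's single running-counter loop as a two-phase decomposition: split the
-- list on "#" into closed segments, then emit [L]*L + [0] per segment (objective: alternative).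

-- ===== PORT A =====
def connection_check (target_list : List String) : List Int :=
  (PySem.List.pyRange 0 target_list.length 1).foldl
    (fun (st : Int × List Int) i =>
      if PySem.List.pyGetD target_list i "" = "#" then
        (0, st.2 ++ (PySem.List.pyRange 0 st.1 1).map (fun _ => st.1) ++ [0])
      else if PySem.List.pyGetD target_list i "" = "." then
        (st.1 + 1, st.2)
      else st)
    (0, []) |>.2

-- ===== PORT B =====
def connection_check_alt (target_list : List String) : List Int :=
  let p := target_list.foldl
    (fun (st : List (List String) × List String) x =>
      if x = "#" then (st.1 ++ [st.2], []) else (st.1, st.2 ++ [x]))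
    ([], [])
  p.1.foldl
    (fun (out : List Int) seg =>
      let L : Int := (PySem.List.count seg "." : Int)
      out ++ List.replicate L.toNat L ++ [0])
    []

-- ===== PRECONDITION & SPEC =====
def Spec_connection_check (target_list : List String) (out : List Int) : Prop := out = connection_check_alt target_list
instance (target_list : List String) (out : List Int) : Decidable (Spec_connection_check target_list out) := by unfold Spec_connection_check; infer_instance

-- ===== CLAIM (what is proved, stated in full; the proofs are below) =====
def Claim_equal_connection_check : Prop := ∀ (target_list : List String), Dom_connection_check target_list → Spec_connection_check target_list (connection_check target_list)

-- ===== LEMMAS AND PROOFS =====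

def stepA (st : Int × List Int) (x : String) : Int × List Int :=
  if x = "#" then (0, st.2 ++ (PySem.List.pyRange 0 st.1 1).map (fun _ => st.1) ++ [0])
  else if x = "." then (st.1 + 1, st.2)
  else st

def stepSegs (st : List (List String) × List String) (x : String) : List (List String) × List String :=
  if x = "#" then (st.1 ++ [st.2], []) else (st.1, st.2 ++ [x])

def stepOut (out : List Int) (seg : List String) : List Int :=
  let L : Int := (PySem.List.count seg "." : Int)
  out ++ List.replicate L.toNat L ++ [0]

lemma stepA_hash (st : Int × List Int) :
    stepA st "#" = (0, st.2 ++ (PySem.List.pyRange 0 st.1 1).map (fun _ => st.1) ++ [0]) := by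
  simp [stepA]

lemma stepA_dot (st : Int × List Int) : stepA st "." = (st.1 + 1, st.2) := by simp [stepA]

lemma stepA_other (st : Int × List Int) {x : String} (hx : x ≠ "#") (hd : x ≠ ".") :
    stepA st x = st := by simp [stepA, hx, hd]

lemma stepSegs_hash (st : List (List String) × List String) :
    stepSegs st "#" = (st.1 ++ [st.2], []) := by simp [stepSegs]

lemma stepSegs_other (st : List (List String) × List String) {x : String} (hx : x ≠ "#") :
    stepSegs st x = (st.1, st.2 ++ [x]) := by simp [stepSegs, hx]

lemma connection_check_eq_foldl (tl : List String) :
    connection_check tl = (tl.foldl stepA (0, [])).2 := by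
  unfold connection_check
  rw [show (fun (st : Int × List Int) i =>
        if PySem.List.pyGetD tl i "" = "#" then
          (0, st.2 ++ (PySem.List.pyRange 0 st.1 1).map (fun _ => st.1) ++ [0])
        else if PySem.List.pyGetD tl i "" = "." then (st.1 + 1, st.2) else st)
      = (fun (st : Int × List Int) i => stepA st (PySem.List.pyGetD tl i "")) from rfl]
  rw [PySem.List.foldl_pyRange_zero_pyGetD' tl "" stepA ((0 : Int), ([] : List Int))]

lemma replicate_of_pyRange (c : Int) :
    (PySem.List.pyRange 0 c 1).map (fun _ => c) = List.replicate c.toNat c := by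
  apply List.eq_replicate_iff.mpr
  constructor
  · simp [PySem.List.length_pyRange_one]
  · intro b hb
    simp only [List.mem_map] at hb
    obtain ⟨_, _, h⟩ := hb
    exact h.symm

lemma segs_prefix (tl : List String) (s : List (List String)) (cur : List String) :
    (tl.foldl stepSegs (s, cur)).1 = s ++ (tl.foldl stepSegs ([], cur)).1 := by
  induction tl generalizing s cur with
  | nil => simp
  | cons x tl ih =>
    by_cases hx : x = "#"
    · subst hx
      rw [List.foldl_cons, List.foldl_cons, stepSegs_hash, stepSegs_hash]
      rw [ih (s ++ [cur]) [], ih ([] ++ [cur]) []]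
      simp
    · rw [List.foldl_cons, List.foldl_cons, stepSegs_other _ hx, stepSegs_other _ hx]
      exact ih s (cur ++ [x])

lemma key (tl : List String) (cur : List String) (acc : List Int) :
    (tl.foldl stepA ((PySem.List.count cur "." : Int), acc)).2
      = (tl.foldl stepSegs ([], cur)).1.foldl stepOut acc := by
  induction tl generalizing cur acc with
  | nil => simp
  | cons x tl ih =>
    by_cases hx : x = "#"
    · subst hx
      rw [List.foldl_cons, List.foldl_cons, stepA_hash, stepSegs_hash]
      rw [segs_prefix tl ([] ++ [cur]) [], List.foldl_append]
      have e1 : acc ++ (PySem.List.pyRange 0 ((PySem.List.count cur "." : Int)) 1).map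
            (fun _ => (PySem.List.count cur "." : Int)) ++ [0] = stepOut acc cur := by
        rw [replicate_of_pyRange]; rfl
      have e0 : (0 : Int) = ((PySem.List.count ([] : List String) ".") : Int) := by
        simp [PySem.List.count_eq]
      rw [e1, show ((0 : Int), stepOut acc cur)
            = (((PySem.List.count ([] : List String) ".") : Int), stepOut acc cur) from by
          rw [← e0]]
      rw [ih [] (stepOut acc cur)]
      simp
    · by_cases hd : x = "."
      · subst hd
        rw [List.foldl_cons, List.foldl_cons, stepA_dot, stepSegs_other _ hx]
        have e : ((PySem.List.count cur ".") : Int) + 1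
            = ((PySem.List.count (cur ++ ["."]) ".") : Int) := by
          simp [PySem.List.count_eq]
        rw [show ((PySem.List.count cur "." : Int), acc).1 + 1
              = ((PySem.List.count (cur ++ ["."]) ".") : Int) from e]
        exact ih (cur ++ ["."]) acc
      · rw [List.foldl_cons, List.foldl_cons, stepA_other _ hx hd, stepSegs_other _ hx]
        have e : ((PySem.List.count cur ".") : Int)
            = ((PySem.List.count (cur ++ [x]) ".") : Int) := by
          simp [PySem.List.count_eq, hd]
        rw [e]
        exact ih (cur ++ [x]) acc

-- ===== VERDICT (by name: the statement is the Claim_ definition above) =====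
theorem connection_check_spec : Claim_equal_connection_check := by
  intro tl _
  show connection_check tl = connection_check_alt tl
  rw [connection_check_eq_foldl]
  have e0 : ((0 : Int), ([] : List Int))
      = (((PySem.List.count ([] : List String) ".") : Int), ([] : List Int)) := by
    simp [PySem.List.count_eq]
  rw [e0, key]
  rfl
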